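-- pv_equiv track=rewrite | github.com/ravmiecznik/aquapi | aquaserver/ph_controller.py | crc_xmodem
-- ===== SOURCE A (Python) =====
-- def crc_xmodem(_crc, data):
--     _crc = 0xffff & (_crc ^ (data << 8))
--     for i in range(0, 8):
--         if _crc & 0x8000:
--             _crc = 0xffff & ((_crc << 1) ^ 0x1021)
--         else:
--             _crc = (0xffff & (_crc << 1))
--     return _crc
-- ===== SOURCE B (Python) =====
-- # Table-driven CRC-16/XMODEM: the 8-round bit loop is precomputed once into a
-- # 256-entry table at module scope; each call is a single table lookup.
-- def _crc16_entry(byte):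
--     c = byte << 8
--     for _ in range(8):
--         if c & 0x8000:
--             c = 0xffff & ((c << 1) ^ 0x1021)
--         else:
--             c = 0xffff & (c << 1)
--     return c
--
-- _CRC_TABLE = [_crc16_entry(byte) for byte in range(256)]
--
-- def crc_xmodem(_crc, data):
--     return ((_crc & 0xff) << 8) ^ _CRC_TABLE[((_crc >> 8) ^ data) & 0xff]
-- ===== Notes on version B (the rewrite author's own statement) =====
-- stated objective: faster
-- what changed: Replaced the per-call 8-round shift/feedback bit loop by a module-level precomputed 256-entry CRC table, so each call is one table lookup: ((_crc & 0xff) << 8) ^ TABLE[((_crc >> 8) ^ data) & 0xff].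
import Mathlib
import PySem

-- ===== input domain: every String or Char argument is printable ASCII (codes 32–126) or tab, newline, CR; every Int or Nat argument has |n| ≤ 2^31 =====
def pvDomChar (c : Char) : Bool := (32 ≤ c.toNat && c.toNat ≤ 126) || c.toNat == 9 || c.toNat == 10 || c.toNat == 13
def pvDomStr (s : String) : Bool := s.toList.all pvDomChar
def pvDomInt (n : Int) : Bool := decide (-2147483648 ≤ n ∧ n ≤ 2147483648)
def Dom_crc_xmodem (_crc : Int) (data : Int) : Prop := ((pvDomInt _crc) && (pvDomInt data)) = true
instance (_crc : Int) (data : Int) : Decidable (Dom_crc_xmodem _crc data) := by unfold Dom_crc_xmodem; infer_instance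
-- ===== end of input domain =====

-- B replaces A's per-call 8-round shift/feedback loop by a module-level precomputed
-- 256-entry CRC table: each call is a single table lookup (objective: faster).

-- ===== PORT A =====
-- literal port of A: mask, then 8 shift/feedback rounds (for i in range(0, 8))
def crc_xmodem (_crc : Int) (data : Int) : Int :=
  let c0 : Int := PySem.Int.band 0xffff (PySem.Int.bxor _crc (data <<< (8 : Nat)))
  (PySem.List.pyRange 0 8 1).foldl (fun c _ =>
    if PySem.Int.band c 0x8000 ≠ 0 then
      PySem.Int.band 0xffff (PySem.Int.bxor (c <<< (1 : Nat)) 0x1021)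
    else
      PySem.Int.band 0xffff (c <<< (1 : Nat))) c0

-- ===== PORT B =====
-- port of Source B's module-level table generator _crc16_entry
def crc16Entry (byte : Int) : Int :=
  (PySem.List.pyRange 0 8 1).foldl (fun c _ =>
    if PySem.Int.band c 0x8000 ≠ 0 then
      PySem.Int.band 0xffff (PySem.Int.bxor (c <<< (1 : Nat)) 0x1021)
    else
      PySem.Int.band 0xffff (c <<< (1 : Nat))) (byte <<< (8 : Nat))

-- port of _CRC_TABLE = [_crc16_entry(byte) for byte in range(256)]
def crcTable : List Int := (PySem.List.pyRange 0 256 1).map crc16Entry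

-- the list index ((_crc >> 8) ^ data) & 0xff is provably in [0, 256), so the
-- default 0 of pyGetD is never taken (Python's TABLE[i] never raises here)
def crc_xmodem_alt (_crc : Int) (data : Int) : Int :=
  PySem.Int.bxor ((PySem.Int.band _crc 0xff) <<< (8 : Nat))
    (PySem.List.pyGetD crcTable (PySem.Int.band (PySem.Int.bxor (_crc >>> (8 : Nat)) data) 0xff) 0)

-- ===== PRECONDITION & SPEC =====
def Spec_crc_xmodem (_crc : Int) (data : Int) (out : Int) : Prop := out = crc_xmodem_alt _crc data
instance (_crc : Int) (data : Int) (out : Int) : Decidable (Spec_crc_xmodem _crc data out) := by unfold Spec_crc_xmodem; infer_instance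

-- ===== CLAIM (what is proved, stated in full; the proofs are below) =====
def Claim_equal_crc_xmodem : Prop := ∀ (_crc : Int) (data : Int), Dom_crc_xmodem _crc data → Spec_crc_xmodem _crc data (crc_xmodem _crc data)

-- ===== LEMMAS AND PROOFS =====

/-! Nat-level model of one CRC round and of k rounds. -/
def stepN (c : Nat) : Nat :=
  if c &&& 0x8000 ≠ 0 then 0xffff &&& ((c <<< 1) ^^^ 0x1021) else 0xffff &&& (c <<< 1)

def roundsN : Nat → Nat → Nat
  | 0, c => c
  | k + 1, c => roundsN k (stepN c)

/-! Generic Nat bit lemmas. -/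
theorem and_add_ldiff : ∀ (x u : Nat), (x &&& u) + Nat.ldiff x u = x := by
  intro x
  induction x using Nat.binaryRec with
  | zero =>
    intro u
    have h0 : Nat.ldiff 0 u = 0 := by
      apply Nat.eq_of_testBit_eq; intro i; simp [Nat.testBit_ldiff]
    simp [h0]
  | bit b n ih =>
    intro u
    rw [← Nat.bit_decide_mod_two_eq_one_shiftRight_one u, Nat.land_bit, Nat.ldiff_bit,
      Nat.bit_val, Nat.bit_val, Nat.bit_val]
    have h := ih (u >>> 1)
    cases b <;> cases hb : decide (u % 2 = 1) <;>
      simp only [Bool.and_true, Bool.and_false, Bool.not_true, Bool.not_false,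
        Bool.toNat_true, Bool.toNat_false] <;> omega

theorem sub_and_eq_ldiff (x u : Nat) : x - (x &&& u) = Nat.ldiff x u := by
  have := and_add_ldiff x u; omega

theorem add_eq_or_of_and_eq_zero {m n : Nat} (h : m &&& n = 0) : m + n = m ||| n := by
  have hpt : ∀ j, (m.testBit j && n.testBit j) = false := by
    intro j
    have h0 : (m &&& n).testBit j = Nat.testBit 0 j := by rw [h]
    rw [Nat.testBit_and, Nat.zero_testBit] at h0
    exact h0
  have h1 : (m ||| n) &&& n = n := by
    apply Nat.eq_of_testBit_eq; intro j
    cases hn : n.testBit j <;> simp [Nat.testBit_and, Nat.testBit_or, hn]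
  have h2 : Nat.ldiff (m ||| n) n = m := by
    apply Nat.eq_of_testBit_eq; intro j
    have := hpt j
    simp only [Nat.testBit_ldiff, Nat.testBit_or]
    cases hm : m.testBit j <;> cases hn : n.testBit j <;> simp_all
  have := and_add_ldiff (m ||| n) n
  rw [h1, h2] at this
  omega

/-! testBit characterization of the PySem/core Int operations (Int.testBit is
    Mathlib's: bit j of the infinite two's-complement representation). -/
theorem testBit_natCast (n : Nat) (j : Nat) : Int.testBit (↑n) j = n.testBit j := rfl

theorem testBit_negSucc (n : Nat) (j : Nat) : Int.testBit (Int.negSucc n) j = !n.testBit j := rfl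

theorem neg_natCast_sub_one (m : Nat) : -(↑m : Int) - 1 = Int.negSucc m := by
  rw [Int.negSucc_eq]; ring

theorem testBit_bxor (a b : Int) (j : Nat) :
    Int.testBit (PySem.Int.bxor a b) j = (Int.testBit a j).xor (Int.testBit b j) := by
  cases a with
  | ofNat m =>
    cases b with
    | ofNat n =>
      simp [PySem.Int.bxor, Int.ofNat_eq_natCast, Int.toNat_natCast, testBit_natCast,
        Nat.testBit_xor]
    | negSucc n =>
      have hb : ¬ (0 : Int) ≤ Int.negSucc n := by simp [Int.negSucc_eq]; omega
      have hbn : (-(Int.negSucc n) - 1) = (↑n : Int) := by rw [Int.negSucc_eq]; ring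
      rw [show PySem.Int.bxor (Int.ofNat m) (Int.negSucc n)
          = -↑((Int.ofNat m).toNat ^^^ (-(Int.negSucc n) - 1).toNat) - 1 from by
        unfold PySem.Int.bxor
        rw [if_pos (by exact Int.natCast_nonneg m), if_neg hb]]
      rw [hbn, Int.ofNat_eq_natCast, Int.toNat_natCast, Int.toNat_natCast, neg_natCast_sub_one,
        testBit_negSucc, testBit_natCast, testBit_negSucc, Nat.testBit_xor]
      cases m.testBit j <;> cases n.testBit j <;> rfl
  | negSucc m =>
    have ha : ¬ (0 : Int) ≤ Int.negSucc m := by simp [Int.negSucc_eq]; omega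
    have ham : (-(Int.negSucc m) - 1) = (↑m : Int) := by rw [Int.negSucc_eq]; ring
    cases b with
    | ofNat n =>
      rw [show PySem.Int.bxor (Int.negSucc m) (Int.ofNat n)
          = -↑((-(Int.negSucc m) - 1).toNat ^^^ (Int.ofNat n).toNat) - 1 from by
        unfold PySem.Int.bxor
        rw [if_neg ha, if_pos (by exact Int.natCast_nonneg n)]]
      rw [ham, Int.ofNat_eq_natCast, Int.toNat_natCast, Int.toNat_natCast, neg_natCast_sub_one,
        testBit_negSucc, testBit_natCast, testBit_negSucc, Nat.testBit_xor]
      cases m.testBit j <;> cases n.testBit j <;> rfl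
    | negSucc n =>
      have hb : ¬ (0 : Int) ≤ Int.negSucc n := by simp [Int.negSucc_eq]; omega
      have hbn : (-(Int.negSucc n) - 1) = (↑n : Int) := by rw [Int.negSucc_eq]; ring
      rw [show PySem.Int.bxor (Int.negSucc m) (Int.negSucc n)
          = ↑((-(Int.negSucc m) - 1).toNat ^^^ (-(Int.negSucc n) - 1).toNat) from by
        unfold PySem.Int.bxor
        rw [if_neg ha, if_neg hb]]
      rw [ham, hbn, Int.toNat_natCast, Int.toNat_natCast, testBit_natCast,
        testBit_negSucc, testBit_negSucc, Nat.testBit_xor]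
      cases m.testBit j <;> cases n.testBit j <;> rfl

theorem testBit_band (a b : Int) (j : Nat) :
    Int.testBit (PySem.Int.band a b) j = (Int.testBit a j && Int.testBit b j) := by
  cases a with
  | ofNat m =>
    cases b with
    | ofNat n =>
      simp [PySem.Int.band, Int.ofNat_eq_natCast, Int.toNat_natCast, testBit_natCast,
        Nat.testBit_and]
    | negSucc n =>
      have hb : ¬ (0 : Int) ≤ Int.negSucc n := by simp [Int.negSucc_eq]; omega
      have hbn : (-(Int.negSucc n) - 1) = (↑n : Int) := by rw [Int.negSucc_eq]; ring
      rw [show PySem.Int.band (Int.ofNat m) (Int.negSucc n)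
          = ↑((Int.ofNat m).toNat - ((Int.ofNat m).toNat &&& (-(Int.negSucc n) - 1).toNat)) from by
        unfold PySem.Int.band
        rw [if_pos (by exact Int.natCast_nonneg m), if_neg hb]]
      rw [hbn, Int.ofNat_eq_natCast, Int.toNat_natCast, Int.toNat_natCast, sub_and_eq_ldiff,
        testBit_natCast, testBit_natCast, testBit_negSucc, Nat.testBit_ldiff]
  | negSucc m =>
    have ha : ¬ (0 : Int) ≤ Int.negSucc m := by simp [Int.negSucc_eq]; omega
    have ham : (-(Int.negSucc m) - 1) = (↑m : Int) := by rw [Int.negSucc_eq]; ring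
    cases b with
    | ofNat n =>
      rw [show PySem.Int.band (Int.negSucc m) (Int.ofNat n)
          = ↑((Int.ofNat n).toNat - ((Int.ofNat n).toNat &&& (-(Int.negSucc m) - 1).toNat)) from by
        unfold PySem.Int.band
        rw [if_neg ha, if_pos (by exact Int.natCast_nonneg n)]]
      rw [ham, Int.ofNat_eq_natCast, Int.toNat_natCast, Int.toNat_natCast, sub_and_eq_ldiff,
        testBit_natCast, testBit_natCast, testBit_negSucc, Nat.testBit_ldiff, Bool.and_comm]
    | negSucc n =>
      have hb : ¬ (0 : Int) ≤ Int.negSucc n := by simp [Int.negSucc_eq]; omega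
      have hbn : (-(Int.negSucc n) - 1) = (↑n : Int) := by rw [Int.negSucc_eq]; ring
      rw [show PySem.Int.band (Int.negSucc m) (Int.negSucc n)
          = -↑((-(Int.negSucc m) - 1).toNat ||| (-(Int.negSucc n) - 1).toNat) - 1 from by
        unfold PySem.Int.band
        rw [if_neg ha, if_neg hb]]
      rw [ham, hbn, Int.toNat_natCast, Int.toNat_natCast, neg_natCast_sub_one,
        testBit_negSucc, testBit_negSucc, testBit_negSucc, Nat.testBit_or]
      cases m.testBit j <;> cases n.testBit j <;> rfl

theorem testBit_shl (a : Int) (k j : Nat) :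
    Int.testBit (a <<< k) j = (decide (k ≤ j) && Int.testBit a (j - k)) := by
  cases a with
  | ofNat m =>
    rw [Int.ofNat_eq_natCast, ← Int.natCast_shiftLeft, testBit_natCast, testBit_natCast,
      Nat.testBit_shiftLeft]
  | negSucc m =>
    have h2 : (1 : Nat) ≤ 2 ^ k := Nat.one_le_two_pow
    have hval : (↑(m <<< k + (2 ^ k - 1)) : Int) = (↑m + 1) * (2 : Int) ^ k - 1 := by
      rw [Nat.shiftLeft_eq, Nat.cast_add, Nat.cast_sub h2, Nat.cast_mul, Nat.cast_pow]
      push_cast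
      ring
    have h1 : Int.negSucc m <<< k = Int.negSucc (m <<< k + (2 ^ k - 1)) := by
      rw [Int.shiftLeft_eq, Int.negSucc_eq, Int.negSucc_eq, hval]
      ring
    have hdisj : (m <<< k) &&& (2 ^ k - 1) = 0 := by
      apply Nat.eq_of_testBit_eq; intro i
      rw [Nat.testBit_and, Nat.testBit_shiftLeft, Nat.testBit_two_pow_sub_one, Nat.zero_testBit]
      by_cases hik : i < k
      · rw [decide_eq_false (by omega : ¬ (i ≥ k))]
        rfl
      · rw [decide_eq_false hik, Bool.and_false]
    rw [h1, testBit_negSucc, testBit_negSucc, add_eq_or_of_and_eq_zero hdisj, Nat.testBit_or,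
      Nat.testBit_shiftLeft, Nat.testBit_two_pow_sub_one]
    by_cases hkj : k ≤ j
    · simp [ge_iff_le, hkj]
    · simp [ge_iff_le, hkj, (by omega : j < k)]

theorem testBit_shr (a : Int) (k j : Nat) :
    Int.testBit (a >>> k) j = Int.testBit a (k + j) := by
  cases a with
  | ofNat m =>
    show Int.testBit (Int.ofNat (m >>> k)) j = _
    rw [Int.ofNat_eq_natCast, testBit_natCast, Nat.testBit_shiftRight, Int.ofNat_eq_natCast,
      testBit_natCast]
  | negSucc m =>
    show Int.testBit (Int.negSucc (m >>> k)) j = _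
    rw [testBit_negSucc, testBit_negSucc, Nat.testBit_shiftRight]

theorem testBit_int_literal_ffff (j : Nat) :
    Int.testBit (0xffff : Int) j = decide (j < 16) := by
  show Nat.testBit 0xffff j = decide (j < 16)
  exact Nat.testBit_two_pow_sub_one 16 j

theorem testBit_int_literal_ff (j : Nat) :
    Int.testBit (0xff : Int) j = decide (j < 8) := by
  show Nat.testBit 0xff j = decide (j < 8)
  exact Nat.testBit_two_pow_sub_one 8 j

/-! Value facts about `band` with the byte mask. -/
theorem band_255_eq_emod (a : Int) : PySem.Int.band a 0xff = a % 256 := by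
  unfold PySem.Int.band
  split_ifs with h1 h2 h2
  · rw [show ((0xff : Int).toNat) = 255 from rfl,
      show a.toNat &&& 255 = a.toNat % 256 from Nat.and_two_pow_sub_one_eq_mod a.toNat 8]
    omega
  · omega
  · rw [show ((0xff : Int).toNat) = 255 from rfl, Nat.and_comm,
      show (-a - 1).toNat &&& 255 = (-a - 1).toNat % 256 from
        Nat.and_two_pow_sub_one_eq_mod (-a - 1).toNat 8]
    omega
  · omega

theorem band_nonneg_left (a b : Int) (h : 0 ≤ a) : 0 ≤ PySem.Int.band a b :=
  PySem.Int.band_nonneg_of_nonneg_left b h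

/-! Nat-level CRC lemmas. -/
theorem testBit_mod65536 (x j : Nat) :
    (x % 65536).testBit j = (decide (j < 16) && x.testBit j) := by
  rw [show (65536 : Nat) = 2 ^ 16 from rfl, Nat.testBit_mod_two_pow]

theorem testBit_mod256 (x j : Nat) :
    (x % 256).testBit j = (decide (j < 8) && x.testBit j) := by
  rw [show (256 : Nat) = 2 ^ 8 from rfl, Nat.testBit_mod_two_pow]

theorem and_32768 (c : Nat) : c &&& 0x8000 = if c.testBit 15 then 0x8000 else 0 := by
  have h2p : ∀ i, Nat.testBit 0x8000 i = decide (15 = i) := by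
    intro i; rw [show (0x8000 : Nat) = 2 ^ 15 from rfl, Nat.testBit_two_pow]
  apply Nat.eq_of_testBit_eq; intro j
  rw [Nat.testBit_and, h2p]
  by_cases hj : 15 = j
  · subst hj; cases h : c.testBit 15 <;> simp [h2p]
  · cases h : c.testBit 15 <;> simp [h2p, hj]

theorem mask16_eq_mod (x : Nat) : 0xffff &&& x = x % 65536 := by
  rw [Nat.and_comm]; exact Nat.and_two_pow_sub_one_eq_mod x 16

theorem mod_xor_distrib (x y : Nat) : (x ^^^ y) % 65536 = (x % 65536) ^^^ (y % 65536) := by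
  apply Nat.eq_of_testBit_eq; intro j
  rw [testBit_mod65536, Nat.testBit_xor, Nat.testBit_xor, testBit_mod65536, testBit_mod65536]
  by_cases hj : j < 16
  · rw [decide_eq_true hj]; simp
  · rw [decide_eq_false hj]; simp

theorem xor_4129_mod (x : Nat) : (x ^^^ 0x1021) % 65536 = (x % 65536) ^^^ 0x1021 := by
  rw [mod_xor_distrib]

theorem stepN_eq (c : Nat) :
    stepN c = ((c <<< 1) % 65536) ^^^ (if c.testBit 15 then 0x1021 else 0) := by
  unfold stepN
  rw [and_32768, mask16_eq_mod, mask16_eq_mod]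
  cases h : c.testBit 15
  · simp
  · simp [xor_4129_mod]

theorem shl_one_xor (a b : Nat) : (a ^^^ b) <<< 1 = (a <<< 1) ^^^ (b <<< 1) := by
  apply Nat.eq_of_testBit_eq; intro j
  rw [Nat.testBit_xor, Nat.testBit_shiftLeft, Nat.testBit_shiftLeft, Nat.testBit_shiftLeft,
    Nat.testBit_xor]
  cases decide (j ≥ 1) <;> simp

theorem ite_xor_ite (s t : Bool) :
    (if (s.xor t) then 0x1021 else 0 : Nat) = (if s then 0x1021 else 0) ^^^ (if t then 0x1021 else 0) := by
  cases s <;> cases t <;> simp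

theorem nat_xor_reshuffle (A B C D : Nat) : (A ^^^ B) ^^^ (C ^^^ D) = (A ^^^ C) ^^^ (B ^^^ D) := by
  rw [Nat.xor_assoc A B (C ^^^ D), Nat.xor_assoc A C (B ^^^ D)]
  congr 1
  rw [← Nat.xor_assoc B C D, Nat.xor_comm B C, Nat.xor_assoc]

theorem stepN_xor (a b : Nat) : stepN (a ^^^ b) = stepN a ^^^ stepN b := by
  rw [stepN_eq, stepN_eq, stepN_eq, shl_one_xor, mod_xor_distrib, Nat.testBit_xor, ite_xor_ite,
    nat_xor_reshuffle]

theorem roundsN_xor (k : Nat) : ∀ a b, roundsN k (a ^^^ b) = roundsN k a ^^^ roundsN k b := by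
  induction k with
  | zero => intro a b; rfl
  | succ k ih => intro a b; simp only [roundsN, stepN_xor, ih]

theorem stepN_small (c : Nat) (h : c < 32768) : stepN c = 2 * c := by
  have h15 : c.testBit 15 = false := Nat.testBit_lt_two_pow (by omega)
  have h21 : c <<< 1 = 2 * c := by rw [Nat.shiftLeft_eq]; omega
  rw [stepN_eq, h15, h21, Nat.mod_eq_of_lt (by omega)]
  simp

theorem roundsN_small : ∀ (k c : Nat), c * 2 ^ k ≤ 65535 → roundsN k c = c * 2 ^ k := by
  intro k
  induction k with
  | zero => intro c _; simp [roundsN]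
  | succ k ih =>
    intro c hc
    have h1 : (1 : Nat) ≤ 2 ^ k := Nat.one_le_two_pow
    have heq : (2 * c) * 2 ^ k = c * 2 ^ (k + 1) := by rw [pow_succ]; ring
    have h2 : (2 : Nat) ≤ 2 ^ (k + 1) := by rw [pow_succ]; omega
    have hcc : 2 * c ≤ c * 2 ^ (k + 1) := by
      calc 2 * c = c * 2 := by ring
        _ ≤ c * 2 ^ (k + 1) := Nat.mul_le_mul (le_refl c) h2
    have hsmall : c < 32768 := by
      by_contra hcon
      omega
    show roundsN k (stepN c) = c * 2 ^ (k + 1)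
    rw [stepN_small c hsmall, ih (2 * c) (by rw [heq]; exact hc), heq]

theorem nat_split (n : Nat) : ((n >>> 8) <<< 8) ^^^ (n % 256) = n := by
  apply Nat.eq_of_testBit_eq; intro j
  rw [Nat.testBit_xor, Nat.testBit_shiftLeft, Nat.testBit_shiftRight, testBit_mod256]
  by_cases hj : j < 8
  · rw [decide_eq_false (by omega : ¬ (j ≥ 8)), decide_eq_true hj]
    simp
  · rw [decide_eq_true (by omega : j ≥ 8), decide_eq_false hj,
      show 8 + (j - 8) = j from by omega]
    simp

theorem rounds8_table (n : Nat) :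
    roundsN 8 n = roundsN 8 ((n >>> 8) <<< 8) ^^^ ((n % 256) <<< 8) := by
  conv_lhs => rw [← nat_split n]
  rw [roundsN_xor]
  congr 1
  have hb : n % 256 < 256 := Nat.mod_lt _ (by omega)
  rw [Nat.shiftLeft_eq]
  exact roundsN_small 8 (n % 256) (by omega)

/-! Bridge: the Int loop body on a natural number computes stepN. -/
theorem istep_cast (n : Nat) :
    (if PySem.Int.band (↑n : Int) 0x8000 ≠ 0 then
        PySem.Int.band 0xffff (PySem.Int.bxor ((↑n : Int) <<< (1 : Nat)) 0x1021)
      else PySem.Int.band 0xffff ((↑n : Int) <<< (1 : Nat))) = ↑(stepN n) := by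
  have hsh : ((↑n : Int) <<< (1 : Nat)) = ↑(n <<< 1) := (Int.natCast_shiftLeft n 1).symm
  have hcond : PySem.Int.band (↑n : Int) 0x8000 = ↑(n &&& 0x8000) := by
    rw [show (0x8000 : Int) = ((0x8000 : Nat) : Int) from rfl, PySem.Int.band_natCast]
  have hx : PySem.Int.bxor ((↑n : Int) <<< (1 : Nat)) 0x1021 = ↑((n <<< 1) ^^^ 0x1021) := by
    rw [hsh, show (0x1021 : Int) = ((0x1021 : Nat) : Int) from rfl, PySem.Int.bxor_natCast]
  have hm : ∀ m : Nat, PySem.Int.band 0xffff (↑m : Int) = ↑(0xffff &&& m) := by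
    intro m
    rw [show (0xffff : Int) = ((0xffff : Nat) : Int) from rfl, PySem.Int.band_natCast]
  unfold stepN
  by_cases h : n &&& 0x8000 ≠ 0
  · rw [if_pos (by rw [hcond]; exact_mod_cast h), if_pos h, hx, hm]
  · rw [if_neg (by rw [hcond]; simpa using h), if_neg h, hsh, hm]

theorem foldl_cast (l : List Int) : ∀ n : Nat,
    l.foldl (fun c _ =>
      if PySem.Int.band c 0x8000 ≠ 0 then
        PySem.Int.band 0xffff (PySem.Int.bxor (c <<< (1 : Nat)) 0x1021)
      else PySem.Int.band 0xffff (c <<< (1 : Nat))) (↑n : Int)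
      = ↑(l.foldl (fun m _ => stepN m) n) := by
  induction l with
  | nil => intro n; rfl
  | cons x xs ih =>
    intro n
    simp only [List.foldl_cons]
    rw [istep_cast, ih]

theorem pyRange8 : PySem.List.pyRange 0 8 1 = [0, 1, 2, 3, 4, 5, 6, 7] := by decide

theorem foldl_rounds (n : Nat) :
    (PySem.List.pyRange 0 8 1).foldl (fun m _ => stepN m) n = roundsN 8 n := by
  rw [pyRange8]
  simp only [List.foldl_cons, List.foldl_nil]
  rfl

theorem crc_xmodem_of_ints (_crc data : Int) :
    crc_xmodem _crc data =
      ↑(roundsN 8 (PySem.Int.band 0xffff (PySem.Int.bxor _crc (data <<< (8 : Nat)))).toNat) := by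
  have h0 : 0 ≤ PySem.Int.band 0xffff (PySem.Int.bxor _crc (data <<< (8 : Nat))) :=
    band_nonneg_left _ _ (by norm_num)
  obtain ⟨M, hM⟩ : ∃ M : Nat,
      PySem.Int.band 0xffff (PySem.Int.bxor _crc (data <<< (8 : Nat))) = ↑M :=
    ⟨_, (Int.toNat_of_nonneg h0).symm⟩
  unfold crc_xmodem
  rw [hM, foldl_cast, foldl_rounds, Int.toNat_natCast]

theorem crc_main (crc data : Int) : crc_xmodem crc data = crc_xmodem_alt crc data := by
  have h0 : 0 ≤ PySem.Int.band 0xffff (PySem.Int.bxor crc (data <<< (8 : Nat))) :=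
    band_nonneg_left _ _ (by norm_num)
  set X : Int := PySem.Int.bxor crc (data <<< (8 : Nat)) with hX
  set M : Nat := (PySem.Int.band 0xffff X).toNat with hMdef
  have hMc : (↑M : Int) = PySem.Int.band 0xffff X := Int.toNat_of_nonneg h0
  have hMbit : ∀ j, M.testBit j = (decide (j < 16) && Int.testBit X j) := by
    intro j
    rw [← testBit_natCast M j, hMc, testBit_band, testBit_int_literal_ffff]
  have hXbit : ∀ j, Int.testBit X j
      = ((Int.testBit crc j).xor (decide (8 ≤ j) && Int.testBit data (j - 8))) := by
    intro j; rw [hX, testBit_bxor, testBit_shl]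
  set I : Int := PySem.Int.band (PySem.Int.bxor (crc >>> (8 : Nat)) data) 0xff with hI
  have hIemod : I = (PySem.Int.bxor (crc >>> (8 : Nat)) data) % 256 := band_255_eq_emod _
  have hInn : 0 ≤ I ∧ I < 256 := by
    rw [hIemod]
    exact ⟨Int.emod_nonneg _ (by norm_num), Int.emod_lt_of_pos _ (by norm_num)⟩
  set H : Nat := I.toNat with hHdef
  have hHc : (↑H : Int) = I := Int.toNat_of_nonneg hInn.1
  have hHbit : ∀ j, H.testBit j
      = (decide (j < 8) && ((Int.testBit crc (8 + j)).xor (Int.testBit data j))) := by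
    intro j
    rw [← testBit_natCast H j, hHc, hI, testBit_band, testBit_int_literal_ff, testBit_bxor,
      testBit_shr, Bool.and_comm]
  have hL0 : 0 ≤ PySem.Int.band crc 0xff := by
    rw [band_255_eq_emod]
    exact Int.emod_nonneg _ (by norm_num)
  set L : Nat := (PySem.Int.band crc 0xff).toNat with hLdef
  have hLc : (↑L : Int) = PySem.Int.band crc 0xff := Int.toNat_of_nonneg hL0
  have hLbit : ∀ j, L.testBit j = (decide (j < 8) && Int.testBit crc j) := by
    intro j
    rw [← testBit_natCast L j, hLc, testBit_band, testBit_int_literal_ff, Bool.and_comm]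
  have eq1 : M >>> 8 = H := by
    apply Nat.eq_of_testBit_eq; intro j
    rw [Nat.testBit_shiftRight, hMbit, hXbit, hHbit]
    by_cases hj : j < 8
    · rw [decide_eq_true (by omega : 8 + j < 16), decide_eq_true (by omega : 8 ≤ 8 + j),
        decide_eq_true hj, show 8 + j - 8 = j from by omega]
      simp
    · rw [decide_eq_false (by omega : ¬ (8 + j < 16)), decide_eq_false hj]
      simp
  have eq2 : M % 256 = L := by
    apply Nat.eq_of_testBit_eq; intro j
    rw [testBit_mod256, hMbit, hXbit, hLbit]
    by_cases hj : j < 8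
    · rw [decide_eq_true hj, decide_eq_true (by omega : j < 16),
        decide_eq_false (by omega : ¬ (8 ≤ j))]
      simp
    · rw [decide_eq_false hj]
      simp
  have htab : PySem.List.pyGetD crcTable I 0 = crc16Entry I := by
    unfold crcTable
    exact PySem.List.pyGetD_map_pyRange_of_nonneg _ _ _ _ hInn.1 hInn.2
  have hentry : crc16Entry I = ↑(roundsN 8 (H <<< 8)) := by
    unfold crc16Entry
    rw [← hHc, ← Int.natCast_shiftLeft, foldl_cast, foldl_rounds]
  rw [crc_xmodem_of_ints, ← hX, ← hMdef]
  unfold crc_xmodem_alt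
  rw [← hI, htab, hentry, ← hLc, ← Int.natCast_shiftLeft, PySem.Int.bxor_natCast]
  congr 1
  rw [rounds8_table M, eq1, eq2, Nat.xor_comm]

-- ===== VERDICT (by name: the statement is the Claim_ definition above) =====
theorem crc_xmodem_spec : Claim_equal_crc_xmodem := by
  intro _crc data _
  unfold Spec_crc_xmodem
  exact crc_main _crc data
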